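-- pv_equiv track=rewrite | github.com/sa-as31/smapo_ros2 | pogema/grid_config.py | str_map_to_list
-- ===== SOURCE A (Python) =====
-- def str_map_to_list(str_map, free, obstacle):
--     obstacles = []
--     agents = {}
--     targets = {}
--     for idx, line in enumerate(str_map.split()):
--         row = []
--         for char in line:
--             if char == '.':
--                 row.append(free)
--             elif char == '#':
--                 row.append(obstacle)
--             elif 'A' <= char <= 'Z':
--                 targets[char.lower()] = len(obstacles), len(row)
--                 row.append(free)
--             elif 'a' <= char <= 'z':
--                 agents[char.lower()] = len(obstacles), len(row)
--                 row.append(free)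
--             else:
--                 raise KeyError(f"Unsupported symbol '{char}' at line {idx}")
--         if row:
--             if obstacles:
--                 assert len(obstacles[-1]) == len(row), f"Wrong string size for row {idx};"
--             obstacles.append(row)
--
--     targets_xy = []
--     agents_xy = []
--     for _, (x, y) in sorted(agents.items()):
--         agents_xy.append([x, y])
--     for _, (x, y) in sorted(targets.items()):
--         targets_xy.append([x, y])
--
--     assert len(targets_xy) == len(agents_xy)
--     return obstacles, agents_xy, targets_xy
-- ===== SOURCE B (Python) =====
-- def str_map_to_list(str_map, free, obstacle):
--     # Pass 1: build the obstacle grid (all validation happens here).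
--     lines = str_map.split()
--     cell = {'.': free, '#': obstacle}
--     obstacles = []
--     for idx, line in enumerate(lines):
--         row = []
--         for ch in line:
--             if ch in cell:
--                 row.append(cell[ch])
--             elif 'A' <= ch <= 'Z' or 'a' <= ch <= 'z':
--                 row.append(free)
--             else:
--                 raise KeyError(f"Unsupported symbol '{ch}' at line {idx}")
--         if obstacles:
--             assert len(obstacles[0]) == len(row), f"Wrong string size for row {idx};"
--         obstacles.append(row)
--
--     # Pass 2: collect agent/target positions (last occurrence of a letter wins).
--     agents = {}
--     targets = {}
--     for x, line in enumerate(lines):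
--         for y, ch in enumerate(line):
--             if 'a' <= ch <= 'z':
--                 agents[ch] = (x, y)
--             elif 'A' <= ch <= 'Z':
--                 targets[ch.lower()] = (x, y)
--
--     agents_xy = [[x, y] for _, (x, y) in sorted(agents.items())]
--     targets_xy = [[x, y] for _, (x, y) in sorted(targets.items())]
--     assert len(agents_xy) == len(targets_xy)
--     return obstacles, agents_xy, targets_xy
-- ===== Notes on version B (the rewrite author's own statement) =====
-- stated objective: simpler
-- what changed: Single interleaved loop that threads grid rows and agent/target dicts together is split into two independent passes over the split lines: pass 1 builds and validates the obstacle grid via a char-to-cell dict, pass 2 collects agent/target positions with nested enumerate, then both are sorted and compared; xy lists are built by comprehensions instead of append loops.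
import Mathlib
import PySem

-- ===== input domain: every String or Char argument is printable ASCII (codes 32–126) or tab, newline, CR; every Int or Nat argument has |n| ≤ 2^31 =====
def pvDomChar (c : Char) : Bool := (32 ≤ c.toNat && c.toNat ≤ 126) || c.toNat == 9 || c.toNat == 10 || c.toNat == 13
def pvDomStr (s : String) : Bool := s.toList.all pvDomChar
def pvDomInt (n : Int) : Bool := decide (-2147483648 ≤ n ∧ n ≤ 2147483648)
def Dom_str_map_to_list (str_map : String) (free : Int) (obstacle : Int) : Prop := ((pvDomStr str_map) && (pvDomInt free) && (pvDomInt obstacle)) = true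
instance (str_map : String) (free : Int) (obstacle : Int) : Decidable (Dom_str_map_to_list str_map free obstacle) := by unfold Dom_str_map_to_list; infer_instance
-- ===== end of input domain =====

-- B re-implements A as two separate passes (grid building + position collection) instead of one
-- interleaved loop with dict bookkeeping; objective: simpler decomposition, same results.
-- Where the Python raises (KeyError / AssertionError) both option pipelines return none and the
-- ports return ([], [], []); Pre_ excludes exactly those inputs.

-- ===== PORT A =====
-- A's inner loop over the chars of one line: builds the row, records targets/agents positions
-- (len(obstacles), len(row)) before the append; none = KeyError on an unsupported char.
-- (the `idx` from enumerate appears only inside exception message strings, which the port drops)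
def pvARow (free obstacle : Int) (nObst : Int) :
    List Char → List Int → PySem.Dict String (Int × Int) → PySem.Dict String (Int × Int) →
    Option (List Int × PySem.Dict String (Int × Int) × PySem.Dict String (Int × Int))
  | [], row, ag, tg => some (row, ag, tg)
  | c :: cs, row, ag, tg =>
    if c = '.' then pvARow free obstacle nObst cs (row ++ [free]) ag tg
    else if c = '#' then pvARow free obstacle nObst cs (row ++ [obstacle]) ag tg
    else if 'A' ≤ c ∧ c ≤ 'Z' then
      pvARow free obstacle nObst cs (row ++ [free]) ag
        (tg.insert (String.ofList [PySem.Chars.lowerChar c]) (nObst, (row.length : Int)))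
    else if 'a' ≤ c ∧ c ≤ 'z' then
      pvARow free obstacle nObst cs (row ++ [free])
        (ag.insert (String.ofList [PySem.Chars.lowerChar c]) (nObst, (row.length : Int))) tg
    else none

-- A's outer loop over the split lines; none = AssertionError on a row-width mismatch.
def pvALines (free obstacle : Int) :
    List (List Char) → List (List Int) → PySem.Dict String (Int × Int) → PySem.Dict String (Int × Int) →
    Option (List (List Int) × PySem.Dict String (Int × Int) × PySem.Dict String (Int × Int))
  | [], obs, ag, tg => some (obs, ag, tg)
  | line :: rest, obs, ag, tg =>
    match pvARow free obstacle (obs.length : Int) line [] ag tg with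
    | none => none
    | some (row, ag', tg') =>
      if row ≠ [] then
        if obs ≠ [] then
          if ((obs.getLast?).getD []).length = row.length then
            pvALines free obstacle rest (obs ++ [row]) ag' tg'
          else none
        else pvALines free obstacle rest (obs ++ [row]) ag' tg'
      else pvALines free obstacle rest obs ag' tg'

-- keys of agents/targets are distinct, so Python's tuple sort of items() is the stable key-sort
def pvARun (str_map : String) (free obstacle : Int) :
    Option (List (List Int) × List (List Int) × List (List Int)) :=
  match pvALines free obstacle (PySem.Chars.split₀ str_map.toList) [] .empty .empty with
  | none => none
  | some (obs, ag, tg) =>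
    let agents_xy := (PySem.List.sorted ag.items (fun p => p.1) false).foldl
      (fun acc p => acc ++ [[p.2.1, p.2.2]]) []
    let targets_xy := (PySem.List.sorted tg.items (fun p => p.1) false).foldl
      (fun acc p => acc ++ [[p.2.1, p.2.2]]) []
    if targets_xy.length = agents_xy.length then some (obs, agents_xy, targets_xy) else none

def str_map_to_list (str_map : String) (free : Int) (obstacle : Int) :
    List (List Int) × List (List Int) × List (List Int) :=
  (pvARun str_map free obstacle).getD ([], [], [])

-- ===== PORT B =====
-- Pass 1: cell value of one char via the literal {'.':free,'#':obstacle} dict, letters → free.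
def pvBCell (free obstacle : Int) (c : Char) : Option Int :=
  match (PySem.Dict.ofList [('.', free), ('#', obstacle)]).get? c with
  | some v => some v
  | none => if ('A' ≤ c ∧ c ≤ 'Z') ∨ ('a' ≤ c ∧ c ≤ 'z') then some free else none

def pvBRow (free obstacle : Int) : List Char → Option (List Int)
  | [] => some []
  | c :: cs =>
    match pvBCell free obstacle c with
    | none => none
    | some v => match pvBRow free obstacle cs with
      | none => none
      | some r => some (v :: r)

def pvBGrid (free obstacle : Int) : List (List Char) → List (List Int) → Option (List (List Int))
  | [], obs => some obs
  | line :: rest, obs =>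
    match pvBRow free obstacle line with
    | none => none
    | some row =>
      if obs ≠ [] then
        if (obs.headD []).length = row.length then pvBGrid free obstacle rest (obs ++ [row])
        else none
      else pvBGrid free obstacle rest (obs ++ [row])

-- Pass 2: one char of line x at column y updates the agents/targets dicts (last occurrence wins).
def pvBStep (x : Int) (st : PySem.Dict String (Int × Int) × PySem.Dict String (Int × Int))
    (p : Int × Char) : PySem.Dict String (Int × Int) × PySem.Dict String (Int × Int) :=
  if 'a' ≤ p.2 ∧ p.2 ≤ 'z' then (st.1.insert (String.ofList [p.2]) (x, p.1), st.2)
  else if 'A' ≤ p.2 ∧ p.2 ≤ 'Z' then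
    (st.1, st.2.insert (String.ofList [PySem.Chars.lowerChar p.2]) (x, p.1))
  else st

def pvBLineStep (st : PySem.Dict String (Int × Int) × PySem.Dict String (Int × Int))
    (p : Int × List Char) : PySem.Dict String (Int × Int) × PySem.Dict String (Int × Int) :=
  (PySem.List.enumerate p.2 0).foldl (pvBStep p.1) st

def pvBDicts (lines : List (List Char)) :
    PySem.Dict String (Int × Int) × PySem.Dict String (Int × Int) :=
  (PySem.List.enumerate lines 0).foldl pvBLineStep (.empty, .empty)

def pvBRun (str_map : String) (free obstacle : Int) :
    Option (List (List Int) × List (List Int) × List (List Int)) :=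
  let lines := PySem.Chars.split₀ str_map.toList
  match pvBGrid free obstacle lines [] with
  | none => none
  | some obs =>
    let st := pvBDicts lines
    let agents_xy := (PySem.List.sorted st.1.items (fun p => p.1) false).map (fun p => [p.2.1, p.2.2])
    let targets_xy := (PySem.List.sorted st.2.items (fun p => p.1) false).map (fun p => [p.2.1, p.2.2])
    if agents_xy.length = targets_xy.length then some (obs, agents_xy, targets_xy) else none

def str_map_to_list_alt (str_map : String) (free : Int) (obstacle : Int) :
    List (List Int) × List (List Int) × List (List Int) :=
  (pvBRun str_map free obstacle).getD ([], [], [])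

-- ===== PRECONDITION & SPEC =====
-- Pre_ is exactly the set of inputs where the Python A returns normally: every character of the
-- whitespace-split lines is '.', '#' or an ASCII letter (else KeyError), all lines have equal
-- length (else AssertionError), and the number of distinct lowercase letters equals the number
-- of distinct lowercased uppercase letters (else the final AssertionError).
def pvPreCheck (str_map : String) : Bool :=
  let lines := PySem.Chars.split₀ str_map.toList
  (lines.all fun l => l.all fun c =>
    c == '.' || c == '#' || (decide ('A' ≤ c) && decide (c ≤ 'Z')) || (decide ('a' ≤ c) && decide (c ≤ 'z'))) &&
  (lines.all fun l => l.length == (lines.headD []).length) &&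
  ((PySem.List.dedup (lines.flatten.filter fun c => decide ('a' ≤ c) && decide (c ≤ 'z'))).length
    == (PySem.List.dedup ((lines.flatten.filter fun c => decide ('A' ≤ c) && decide (c ≤ 'Z')).map
        PySem.Chars.lowerChar)).length)

def Pre_str_map_to_list (str_map : String) (free : Int) (obstacle : Int) : Prop :=
  pvPreCheck str_map = true

instance (str_map : String) (free : Int) (obstacle : Int) :
    Decidable (Pre_str_map_to_list str_map free obstacle) := by
  unfold Pre_str_map_to_list; infer_instance

def pvWitness_str_map_to_list : String × Int × Int := ("aA.#\n.b.B", 0, 1)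

def Spec_str_map_to_list (str_map : String) (free : Int) (obstacle : Int)
    (out : List (List Int) × List (List Int) × List (List Int)) : Prop :=
  out = str_map_to_list_alt str_map free obstacle
instance (str_map : String) (free : Int) (obstacle : Int)
    (out : List (List Int) × List (List Int) × List (List Int)) :
    Decidable (Spec_str_map_to_list str_map free obstacle out) := by
  unfold Spec_str_map_to_list; infer_instance

-- ===== CLAIM (what is proved, stated in full; the proofs are below) =====
def Claim_equal_str_map_to_list : Prop := ∀ (str_map : String) (free : Int) (obstacle : Int), Dom_str_map_to_list str_map free obstacle → Pre_str_map_to_list str_map free obstacle → Spec_str_map_to_list str_map free obstacle (str_map_to_list str_map free obstacle)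

-- ===== LEMMAS AND PROOFS =====

-- proof helper: pass 2's inner fold with an arbitrary start column
def pvBLineGo (x y0 : Int) (cs : List Char)
    (st : PySem.Dict String (Int × Int) × PySem.Dict String (Int × Int)) :
    PySem.Dict String (Int × Int) × PySem.Dict String (Int × Int) :=
  (PySem.List.enumerate cs y0).foldl (pvBStep x) st
def pvBDictsGo (x : Int) (lines : List (List Char))
    (st : PySem.Dict String (Int × Int) × PySem.Dict String (Int × Int)) :
    PySem.Dict String (Int × Int) × PySem.Dict String (Int × Int) :=
  (PySem.List.enumerate lines x).foldl pvBLineStep st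
theorem pv_split₀_go_ne_nil : ∀ (s cur : List Char) (acc : List (List Char)),
    (∀ t ∈ acc, t ≠ []) → ∀ l ∈ PySem.Chars.split₀.go s cur acc, l ≠ [] := by
  intro s
  induction s with
  | nil =>
    intro cur acc hacc l hl
    simp only [PySem.Chars.split₀.go] at hl
    split at hl
    · exact hacc _ (List.mem_reverse.mp hl)
    · rcases List.mem_cons.mp (List.mem_reverse.mp hl) with rfl | h
      · simpa using List.isEmpty_eq_false_iff.mp (by simpa using ‹¬cur.isEmpty = true›)
      · exact hacc _ h
  | cons c rest ih =>
    intro cur acc hacc l hl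
    simp only [PySem.Chars.split₀.go] at hl
    split at hl
    · split at hl
      · exact ih _ _ hacc _ hl
      · refine ih _ _ ?_ _ hl
        intro t ht
        rcases List.mem_cons.mp ht with rfl | h
        · simpa using List.isEmpty_eq_false_iff.mp (by simpa using ‹¬cur.isEmpty = true›)
        · exact hacc _ h
    · exact ih _ _ hacc _ hl

theorem pv_split₀_ne_nil (s : List Char) : ∀ l ∈ PySem.Chars.split₀ s, l ≠ [] :=
  pv_split₀_go_ne_nil s [] [] (by simp)

theorem pv_lower_of_lower {c : Char} (h1 : 'a' ≤ c) (_h2 : c ≤ 'z') :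
    PySem.Chars.lowerChar c = c := by
  have h : PySem.Chars.isupper c = false := by
    simp only [PySem.Chars.isupper, Bool.and_eq_false_iff, decide_eq_false_iff_not]
    right
    intro h4
    exact absurd (le_trans h1 h4) (by decide)
  simp [PySem.Chars.lowerChar, h]

theorem pvBRow_length {free obstacle : Int} {cs : List Char} {r : List Int}
    (h : pvBRow free obstacle cs = some r) : r.length = cs.length := by
  induction cs generalizing r with
  | nil => simp [pvBRow] at h; subst h; rfl
  | cons c cs ih =>
    simp only [pvBRow] at h
    split at h
    · exact absurd h (by simp)
    · split at h
      · exact absurd h (by simp)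
      · cases h; simp [ih ‹_›]

theorem pv_row_lemma (free obstacle : Int) (cs : List Char) :
    ∀ (row : List Int) (ag tg : PySem.Dict String (Int × Int)) (n y0 : Int),
    y0 = (row.length : Int) →
    pvARow free obstacle n cs row ag tg =
      match pvBRow free obstacle cs with
      | none => none
      | some r => some (row ++ r, pvBLineGo n y0 cs (ag, tg)) := by
  induction cs with
  | nil => intro row ag tg n y0 hy; simp [pvARow, pvBRow, pvBLineGo, PySem.List.enumerate]
  | cons c cs ih =>
    intro row ag tg n y0 hy
    subst hy
    have hgo : ∀ st, pvBLineGo n ((row.length : Int)) (c :: cs) st = pvBLineGo n (((row.length : Int)) + 1) cs (pvBStep n st (((row.length : Int)), c)) := by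
      intro st
      simp [pvBLineGo, PySem.List.enumerate_cons]
    by_cases hdot : c = '.'
    · subst hdot
      rw [pvARow, if_pos rfl, ih (row ++ [free]) ag tg n ((row.length : Int) + 1) (by simp)]
      have hc : pvBCell free obstacle '.' = some free := rfl
      have hst : pvBStep n (ag, tg) (((row.length : Int)), '.') = (ag, tg) := by
        simp [pvBStep]
      rw [pvBRow, hc]
      cases hr : pvBRow free obstacle cs <;> simp [hgo, hst]
    · by_cases hhash : c = '#'
      · subst hhash
        rw [pvARow, if_neg (by decide), if_pos rfl,
          ih (row ++ [obstacle]) ag tg n ((row.length : Int) + 1) (by simp)]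
        have hc : pvBCell free obstacle '#' = some obstacle := rfl
        have hst : pvBStep n (ag, tg) (((row.length : Int)), '#') = (ag, tg) := by
          simp [pvBStep]
        rw [pvBRow, hc]
        cases hr : pvBRow free obstacle cs <;> simp [hgo, hst]
      · have hcell : (PySem.Dict.ofList [('.', free), ('#', obstacle)]).get? c = none := by
          have hit : (PySem.Dict.ofList [('.', free), ('#', obstacle)]).items
              = [('.', free), ('#', obstacle)] := rfl
          simp [PySem.Dict.get?, hit, Ne.symm hdot, Ne.symm hhash]
        by_cases hup : 'A' ≤ c ∧ c ≤ 'Z'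
        · rw [pvARow, if_neg hdot, if_neg hhash, if_pos hup,
            ih (row ++ [free]) ag _ n ((row.length : Int) + 1) (by simp)]
          have hc : pvBCell free obstacle c = some free := by
            simp [pvBCell, hcell, hup]
          have hnl : ¬ ('a' ≤ c ∧ c ≤ 'z') := by
            rintro ⟨hl, -⟩
            exact absurd (le_trans hl hup.2) (by decide)
          have hst : pvBStep n (ag, tg) (((row.length : Int)), c)
              = (ag, tg.insert (String.ofList [PySem.Chars.lowerChar c]) (n, ((row.length : Int)))) := by
            simp [pvBStep, hnl, hup]
          rw [pvBRow, hc]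
          cases hr : pvBRow free obstacle cs <;> simp [hgo, hst]
        · by_cases hlow : 'a' ≤ c ∧ c ≤ 'z'
          · rw [pvARow, if_neg hdot, if_neg hhash, if_neg hup,  if_pos hlow,
              ih (row ++ [free]) _ tg n ((row.length : Int) + 1) (by simp)]
            have hc : pvBCell free obstacle c = some free := by
              simp [pvBCell, hcell, hlow]
            have hst : pvBStep n (ag, tg) (((row.length : Int)), c)
                = (ag.insert (String.ofList [c]) (n, ((row.length : Int))), tg) := by
              simp [pvBStep, hlow]
            rw [pvBRow, hc, pv_lower_of_lower hlow.1 hlow.2]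
            cases hr : pvBRow free obstacle cs <;> simp [hgo, hst]
          · have hc : pvBCell free obstacle c = none := by
              simp [pvBCell, hcell, hup, hlow]
            rw [pvARow, if_neg hdot, if_neg hhash, if_neg hup, if_neg hlow, pvBRow, hc]

theorem pv_lines_lemma (free obstacle : Int) (lines : List (List Char)) :
    ∀ (obs : List (List Int)) (ag tg : PySem.Dict String (Int × Int)),
    (∀ l ∈ lines, l ≠ []) →
    (∀ r ∈ obs, r.length = (obs.headD []).length) →
    pvALines free obstacle lines obs ag tg =
      match pvBGrid free obstacle lines obs with
      | none => none
      | some obs' => some (obs', pvBDictsGo (obs.length : Int) lines (ag, tg)) := by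
  induction lines with
  | nil =>
    intro obs ag tg _ _
    simp [pvALines, pvBGrid, pvBDictsGo, PySem.List.enumerate]
  | cons line rest ih =>
    intro obs ag tg hne huni
    have hgo : ∀ st, pvBDictsGo (obs.length : Int) (line :: rest) st
        = pvBDictsGo ((obs.length : Int) + 1) rest (pvBLineStep st ((obs.length : Int), line)) := by
      intro st
      simp [pvBDictsGo, PySem.List.enumerate_cons]
    have hls : ∀ st, pvBLineStep st ((obs.length : Int), line) = pvBLineGo (obs.length : Int) 0 line st := by
      intro st; rfl
    rw [pvALines, pv_row_lemma free obstacle line [] ag tg (obs.length : Int) 0 (by simp)]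
    cases hr : pvBRow free obstacle line with
    | none => rw [pvBGrid, hr]
    | some row =>
      have hrow : row ≠ [] := by
        intro h
        subst h
        have := pvBRow_length hr
        exact hne line (by simp) (by simpa using this.symm)
      rw [pvBGrid, hr]
      simp only [List.nil_append]
      rw [if_pos hrow]
      by_cases hobs : obs = []
      · subst hobs
        rw [if_neg (by simp), if_neg (by simp)]
        simp only [List.nil_append]
        rw [ih [row] _ _ (fun l hl => hne l (by simp [hl])) (by simp)]
        cases pvBGrid free obstacle rest [row] <;> simp [pvBDictsGo, pvBLineStep, pvBLineGo]
      · rw [if_pos hobs, if_pos hobs]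
        have hmem : (obs.getLast?).getD [] ∈ obs := by
          rw [List.getLast?_eq_some_getLast hobs]
          exact List.getLast_mem hobs
        have hlast : ((obs.getLast?).getD []).length = (obs.headD []).length := huni _ hmem
        rw [hlast]
        by_cases hw : (obs.headD []).length = row.length
        · rw [if_pos hw, if_pos hw]
          have hhead : (obs ++ [row]).headD [] = obs.headD [] := by
            cases obs with
            | nil => exact absurd rfl hobs
            | cons a l => rfl
          rw [ih (obs ++ [row]) _ _ (fun l hl => hne l (by simp [hl]))
            (by
              intro r hr2
              rw [hhead]
              rcases List.mem_append.mp hr2 with h | h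
              · exact huni _ h
              · simp at h; subst h; exact hw.symm)]
          cases pvBGrid free obstacle rest (obs ++ [row]) <;>
            simp [hgo, hls]
        · rw [if_neg hw, if_neg hw]

theorem pv_run_eq (str_map : String) (free obstacle : Int) :
    pvARun str_map free obstacle = pvBRun str_map free obstacle := by
  unfold pvARun pvBRun
  rw [pv_lines_lemma free obstacle (PySem.Chars.split₀ str_map.toList) [] .empty .empty
      (pv_split₀_ne_nil _) (by simp)]
  cases h : pvBGrid free obstacle (PySem.Chars.split₀ str_map.toList) [] with
  | none => simp only [h]
  | some obs =>
    simp only [h]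
    have hd : pvBDictsGo ((([] : List (List Int)).length : Int)) (PySem.Chars.split₀ str_map.toList)
        (.empty, .empty) = pvBDicts (PySem.Chars.split₀ str_map.toList) := rfl
    simp only [hd, PySem.List.foldl_append_singleton_eq_map, List.nil_append]
    by_cases hlen :
        ((PySem.List.sorted (pvBDicts (PySem.Chars.split₀ str_map.toList)).1.items (fun p => p.1) false).map
          (fun p => [p.2.1, p.2.2])).length
        = ((PySem.List.sorted (pvBDicts (PySem.Chars.split₀ str_map.toList)).2.items (fun p => p.1) false).map
          (fun p => [p.2.1, p.2.2])).length
    · rw [if_pos hlen.symm, if_pos hlen]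
    · rw [if_neg (fun hh => hlen hh.symm), if_neg hlen]

-- ===== VERDICT (by name: the statement is the Claim_ definition above) =====
theorem str_map_to_list_spec : Claim_equal_str_map_to_list := by
  intro s f o _ _
  unfold Spec_str_map_to_list str_map_to_list str_map_to_list_alt
  rw [pv_run_eq]
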